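-- pv_equiv track=rewrite | github.com/perng/calligraphy-gallery | scripts/apply_primary_person_review.py | update_all_people
-- ===== SOURCE A (Python) =====
-- from typing import Any
--
-- def unique_clean_strings(values: Any) -> list[str]:
--     if not isinstance(values, list):
--         return []
--
--     cleaned_values: list[str] = []
--     for value in values:
--         if not isinstance(value, str):
--             continue
--         cleaned = value.strip()
--         if cleaned and cleaned not in cleaned_values:
--             cleaned_values.append(cleaned)
--     return cleaned_values
--
-- def update_all_people(values: Any, old_primary: str | None, new_primary: str | None) -> list[str]:
--     all_people = unique_clean_strings(values)
--
--     if old_primary and old_primary != new_primary: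
--         all_people = [person for person in all_people if person != old_primary]
--
--     if new_primary:
--         all_people = [person for person in all_people if person != new_primary]
--         all_people.insert(0, new_primary)
--
--     return all_people
-- ===== SOURCE B (Python) =====
-- from typing import Any
--
-- def update_all_people(values: Any, old_primary, new_primary) -> list[str]:
--     # Dedup back-to-front: walk the values in reverse; each cleaned string is
--     # moved to the front (removing its single later duplicate, if any), so the
--     # front-most occurrence wins; then apply one combined drop filter and
--     # prepend the new primary.
--     people: list[str] = []
--     if isinstance(values, list):
--         for value in reversed(values):
--             c = value.strip() if isinstance(value, str) else ""
--             if c: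
--                 if c in people:
--                     people.remove(c)
--                 people.insert(0, c)
--     drop = {p for p in (old_primary, new_primary) if p}
--     people = [p for p in people if p not in drop]
--     if new_primary:
--         people = [new_primary] + people
--     return people
-- ===== Notes on version B (the rewrite author's own statement) =====
-- stated objective: alternative
-- what changed: Deduplication is done by traversing the values back-to-front and moving each cleaned string to the front of the result (removing its single later duplicate), so the first occurrence wins by displacement instead of A's forward scan with a membership test against the output; the two staged exclusion filters are merged into one drop set applied in a single filter before prepending the new primary.
import Mathlib
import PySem

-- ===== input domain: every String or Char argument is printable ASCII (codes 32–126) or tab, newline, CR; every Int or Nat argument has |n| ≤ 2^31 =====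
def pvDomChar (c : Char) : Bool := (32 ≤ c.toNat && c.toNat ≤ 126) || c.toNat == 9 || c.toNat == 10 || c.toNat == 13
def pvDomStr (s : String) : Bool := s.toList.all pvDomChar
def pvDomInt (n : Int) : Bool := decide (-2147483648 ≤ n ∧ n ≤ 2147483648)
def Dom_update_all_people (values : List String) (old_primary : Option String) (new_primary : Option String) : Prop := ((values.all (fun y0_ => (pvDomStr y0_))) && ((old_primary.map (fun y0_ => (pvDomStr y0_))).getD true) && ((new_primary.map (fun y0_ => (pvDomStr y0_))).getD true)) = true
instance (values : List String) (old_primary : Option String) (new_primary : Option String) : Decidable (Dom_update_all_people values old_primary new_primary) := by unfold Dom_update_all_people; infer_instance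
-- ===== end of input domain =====

-- B deduplicates back-to-front (each cleaned string is moved to the front, displacing its later
-- duplicate) and applies one merged drop-set filter instead of A's forward seen-scan and two
-- staged filters; objective: alternative decomposition (no speed claim).

-- ===== PORT A =====
-- helper unique_clean_strings (the isinstance guards are vacuous: values : List String)
def unique_clean_strings (values : List String) : List String :=
  values.foldl (fun acc v =>
    let cleaned := PySem.Str.strip v
    if cleaned ≠ "" ∧ cleaned ∉ acc then acc ++ [cleaned] else acc) []

def update_all_people (values : List String) (old_primary : Option String) (new_primary : Option String) : List String :=
  let all_people := unique_clean_strings values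
  let all_people :=
    match old_primary with
    | some o => if o ≠ "" ∧ some o ≠ new_primary then all_people.filter (fun p => p ≠ o) else all_people
    | none => all_people
  match new_primary with
  | some n => if n ≠ "" then n :: all_people.filter (fun p => p ≠ n) else all_people
  | none => all_people

-- ===== PORT B =====
-- Source B's reversed loop body: if c in people: people.remove(c); people.insert(0, c)
def dedupStep (people : List String) (v : String) : List String :=
  let c := PySem.Str.strip v
  if c ≠ "" then
    let people := if c ∈ people then (PySem.List.remove? people c).getD people else people
    PySem.List.insert people 0 c
  else people

def dedup_rev (values : List String) : List String :=
  (values.reverse).foldl dedupStep []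

def update_all_people_alt (values : List String) (old_primary : Option String) (new_primary : Option String) : List String :=
  let people := dedup_rev values
  -- drop = {p for p in (old_primary, new_primary) if p}
  let drop : PySem.Set String :=
    match old_primary with
    | some o => if o ≠ "" then PySem.Set.add PySem.Set.empty o else PySem.Set.empty
    | none => PySem.Set.empty
  let drop : PySem.Set String :=
    match new_primary with
    | some n => if n ≠ "" then PySem.Set.add drop n else drop
    | none => drop
  let people := people.filter (fun p => !PySem.Set.contains drop p)
  match new_primary with
  | some n => if n ≠ "" then n :: people else people
  | none => people

-- ===== PRECONDITION & SPEC =====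
def Spec_update_all_people (values : List String) (old_primary : Option String) (new_primary : Option String) (out : List String) : Prop := out = update_all_people_alt values old_primary new_primary
instance (values : List String) (old_primary : Option String) (new_primary : Option String) (out : List String) : Decidable (Spec_update_all_people values old_primary new_primary out) := by unfold Spec_update_all_people; infer_instance

-- ===== CLAIM (what is proved, stated in full; the proofs are below) =====
def Claim_equal_update_all_people : Prop := ∀ (values : List String) (old_primary : Option String) (new_primary : Option String), Dom_update_all_people values old_primary new_primary → Spec_update_all_people values old_primary new_primary (update_all_people values old_primary new_primary)

-- ===== LEMMAS AND PROOFS =====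

-- dedup_rev unfolded as a right fold (the reversed loop processes the last element first)
theorem dedup_rev_cons0 (v : String) (vs : List String) :
    dedup_rev (v :: vs) = dedupStep (dedup_rev vs) v := by
  simp only [dedup_rev, List.foldl_reverse, List.foldr_cons]

-- on a duplicate-free list, "remove then prepend" is "prepend and filter out"
theorem dedupStep_eq (people : List String) (v : String) (h : people.Nodup) :
    dedupStep people v
      = if PySem.Str.strip v ≠ ""
        then PySem.Str.strip v :: people.filter (fun x => x ≠ PySem.Str.strip v)
        else people := by
  unfold dedupStep
  set c := PySem.Str.strip v with hc
  by_cases hce : c ≠ ""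
  · rw [if_pos hce, if_pos hce, PySem.List.insert_zero]
    congr 1
    by_cases hm : c ∈ people
    · rw [if_pos hm, PySem.List.remove?_eq_some_erase people c hm, Option.getD_some,
        List.Nodup.erase_eq_filter h c]
      apply List.filter_congr
      intro x _
      by_cases hx : x = c <;> simp [hx]
    · rw [if_neg hm]
      symm
      apply List.filter_eq_self.mpr
      intro x hx
      simp only [ne_eq, decide_eq_true_eq]
      rintro rfl
      exact hm hx
  · rw [if_neg hce, if_neg hce]

theorem dedup_rev_nodup : ∀ (vs : List String), (dedup_rev vs).Nodup := by
  intro vs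
  induction vs with
  | nil => simp [dedup_rev]
  | cons v vs ih =>
    rw [dedup_rev_cons0, dedupStep_eq _ _ ih]
    split_ifs
    · refine List.Nodup.cons ?_ (ih.filter _)
      simp
    · exact ih

theorem dedup_rev_cons (v : String) (vs : List String) :
    dedup_rev (v :: vs)
      = if PySem.Str.strip v ≠ ""
        then PySem.Str.strip v :: (dedup_rev vs).filter (fun x => x ≠ PySem.Str.strip v)
        else dedup_rev vs := by
  rw [dedup_rev_cons0, dedupStep_eq _ _ (dedup_rev_nodup vs)]

-- A's forward dedup with accumulator acc equals dedup_rev with acc's members removed, appended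
theorem ucs_loop_eq : ∀ (vs acc : List String),
    vs.foldl (fun acc v =>
        let cleaned := PySem.Str.strip v
        if cleaned ≠ "" ∧ cleaned ∉ acc then acc ++ [cleaned] else acc) acc
      = acc ++ (dedup_rev vs).filter (fun c => c ∉ acc) := by
  intro vs
  induction vs with
  | nil => intro acc; simp [dedup_rev]
  | cons v vs ih =>
    intro acc
    rw [List.foldl_cons, dedup_rev_cons]
    set c := PySem.Str.strip v with hc
    by_cases hce : c = ""
    · have h1 : ¬ (c ≠ "" ∧ c ∉ acc) := fun h => h.1 hce
      have h2 : ¬ (c ≠ "") := fun h => h hce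
      rw [if_neg h1, if_neg h2]
      exact ih acc
    · rw [if_pos hce]
      by_cases hin : c ∈ acc
      · have h1 : ¬ (c ≠ "" ∧ c ∉ acc) := fun h => h.2 hin
        rw [if_neg h1, ih acc]
        congr 1
        rw [List.filter_cons_of_neg (by simp [hin]), List.filter_filter]
        apply List.filter_congr
        intro x _
        by_cases hx : x = c
        · subst hx; simp [hin]
        · simp [hx]
      · rw [if_pos ⟨hce, hin⟩, ih (acc ++ [c]), List.append_assoc, List.singleton_append]
        congr 1
        rw [List.filter_cons_of_pos (by simp [hin]), List.filter_filter]
        congr 1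
        apply List.filter_congr
        intro x _
        by_cases hx : x = c
        · subst hx; simp
        · by_cases hxa : x ∈ acc <;> simp [hx, hxa]

theorem ucs_eq (vs : List String) : unique_clean_strings vs = dedup_rev vs := by
  unfold unique_clean_strings
  rw [ucs_loop_eq vs []]
  simp

theorem filter_ne_one (n : String) (l : List String) :
    l.filter (fun c => !PySem.Set.contains [n] c) = l.filter (fun p => p ≠ n) := by
  apply List.filter_congr
  intro a _
  by_cases h : a = n <;> simp [PySem.Set.contains, h]

theorem filter_ne_two (o n : String) (l : List String) :
    l.filter (fun c => !PySem.Set.contains [o, n] c)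
      = (l.filter (fun p => p ≠ o)).filter (fun p => p ≠ n) := by
  rw [List.filter_filter]
  apply List.filter_congr
  intro a _
  by_cases h1 : a = n <;> by_cases h2 : a = o <;> simp [PySem.Set.contains, h1, h2]

theorem filter_none_excl (l : List String) :
    l.filter (fun c => !PySem.Set.contains PySem.Set.empty c) = l := by
  simp [PySem.Set.contains, PySem.Set.empty]

theorem agree (values : List String) (old_primary new_primary : Option String) :
    update_all_people values old_primary new_primary
      = update_all_people_alt values old_primary new_primary := by
  cases old_primary with
  | none =>
    cases new_primary with
    | none =>
      simp only [update_all_people, update_all_people_alt]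
      rw [ucs_eq, filter_none_excl]
    | some n =>
      by_cases hn : n = ""
      · have hnn : ¬ (n ≠ "") := fun h => h hn
        simp only [update_all_people, update_all_people_alt, if_neg hnn]
        rw [ucs_eq, filter_none_excl]
      · simp only [update_all_people, update_all_people_alt, if_pos hn,
          show PySem.Set.add PySem.Set.empty n = [n] from rfl]
        rw [ucs_eq, filter_ne_one]
  | some o =>
    cases new_primary with
    | none =>
      by_cases ho : o = ""
      · have hnc : ¬ (o ≠ "" ∧ (some o : Option String) ≠ none) := fun h => h.1 ho
        have hnn : ¬ (o ≠ "") := fun h => h ho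
        simp only [update_all_people, update_all_people_alt, if_neg hnc, if_neg hnn]
        rw [ucs_eq, filter_none_excl]
      · have hc : o ≠ "" ∧ (some o : Option String) ≠ none := ⟨ho, by simp⟩
        simp only [update_all_people, update_all_people_alt, if_pos hc, if_pos ho,
          show PySem.Set.add PySem.Set.empty o = [o] from rfl]
        rw [ucs_eq, filter_ne_one]
    | some n =>
      by_cases hn : n = ""
      · have hnn : ¬ (n ≠ "") := fun h => h hn
        by_cases ho : o = ""
        · have hnc : ¬ (o ≠ "" ∧ some o ≠ some n) := fun h => h.1 ho
          have hno : ¬ (o ≠ "") := fun h => h ho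
          simp only [update_all_people, update_all_people_alt, if_neg hnc, if_neg hnn, if_neg hno]
          rw [ucs_eq, filter_none_excl]
        · have hon : o ≠ n := by rw [hn]; exact ho
          have hc : o ≠ "" ∧ some o ≠ some n := ⟨ho, by simp [hon]⟩
          simp only [update_all_people, update_all_people_alt, if_pos hc, if_neg hnn, if_pos ho,
            show PySem.Set.add PySem.Set.empty o = [o] from rfl]
          rw [ucs_eq, filter_ne_one]
      · by_cases ho : o = ""
        · have hnc : ¬ (o ≠ "" ∧ some o ≠ some n) := fun h => h.1 ho
          have hno : ¬ (o ≠ "") := fun h => h ho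
          simp only [update_all_people, update_all_people_alt, if_neg hnc, if_pos hn, if_neg hno,
            show PySem.Set.add PySem.Set.empty n = [n] from rfl]
          rw [ucs_eq, filter_ne_one]
        · by_cases hon : o = n
          · have hnc : ¬ (o ≠ "" ∧ some o ≠ some n) := fun h => h.2 (by rw [hon])
            have hadd : PySem.Set.add (PySem.Set.add PySem.Set.empty o) n = [n] := by
              subst hon; simp [PySem.Set.add, PySem.Set.empty, PySem.Set.contains]
            simp only [update_all_people, update_all_people_alt, if_neg hnc, if_pos hn, if_pos ho,
              hadd]
            rw [ucs_eq, filter_ne_one]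
          · have hc : o ≠ "" ∧ some o ≠ some n := ⟨ho, by simp [hon]⟩
            have hadd : PySem.Set.add (PySem.Set.add PySem.Set.empty o) n = [o, n] := by
              simp [PySem.Set.add, PySem.Set.empty, PySem.Set.contains, Ne.symm hon]
            simp only [update_all_people, update_all_people_alt, if_pos hc, if_pos hn, if_pos ho,
              hadd]
            rw [ucs_eq, filter_ne_two]

-- ===== VERDICT (by name: the statement is the Claim_ definition above) =====
theorem update_all_people_spec : Claim_equal_update_all_people := by
  intro values old_primary new_primary _
  unfold Spec_update_all_people
  exact agree values old_primary new_primary
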